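-- pv_equiv track=rewrite | github.com/codeMonkey760/py3dengine | py3dengine/wfoparser/lexer.py | _lex_polygon
-- ===== SOURCE A (Python) =====
-- from queue import deque
--
-- def _lex_polygon(chars):
--     q = deque(chars)
--     buffer = ''
--     data = []
--     divider_count = 0
--
--     try:
--         while len(q) > 0:
--             c = q.popleft()
--             if c != '/':
--                 buffer += c
--             else:
--                 if divider_count == 2:
--                     raise ValueError('Too many indices')
--                 divider_count += 1
--                 if buffer == '':
--                     data.append(None)
--                 else:
--                     data.append(int(buffer))
--                     buffer = ''
--         if buffer == '':
--             data.append(None)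
--         else:
--             data.append(int(buffer))
--     except ValueError:
--         raise ValueError('Invalid polygon format')
--
--     return (*data,)
-- ===== SOURCE B (Python) =====
-- def _lex_polygon(chars):
--     parts = ''.join(chars).split('/')
--     try:
--         if len(parts) > 3:
--             raise ValueError('Too many indices')
--         return tuple(int(p) if p else None for p in parts)
--     except ValueError:
--         raise ValueError('Invalid polygon format')
-- ===== Notes on version B (the rewrite author's own statement) =====
-- stated objective: simpler
-- what changed: Replaces A's char-by-char deque streaming loop with mutable buffer/divider-count state by a two-phase two-phase pass: split on the divider character, then map each segment to an int or None.
import Mathlib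
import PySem

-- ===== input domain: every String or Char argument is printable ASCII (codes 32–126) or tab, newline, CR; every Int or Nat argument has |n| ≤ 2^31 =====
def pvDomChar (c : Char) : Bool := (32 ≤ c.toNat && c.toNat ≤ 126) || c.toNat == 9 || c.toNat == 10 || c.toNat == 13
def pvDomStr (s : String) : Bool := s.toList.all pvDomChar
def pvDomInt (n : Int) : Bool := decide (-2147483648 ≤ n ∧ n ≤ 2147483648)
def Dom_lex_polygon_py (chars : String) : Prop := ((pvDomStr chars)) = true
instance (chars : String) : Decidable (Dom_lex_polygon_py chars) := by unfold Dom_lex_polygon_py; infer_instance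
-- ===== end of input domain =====

-- B replaces A's char-by-char deque streaming loop by a two-phase pass: split on the divider
-- character, then map each segment (objective: simpler). Where the Python programs raise
-- (both do, on the same inputs) the ports return [] and Pre_ excludes those inputs.


-- ===== PORT A =====
-- 'if buffer == "": data.append(None) else: data.append(int(buffer))'; none = int() raised ValueError
def pvConvA (buf : List Char) : Option (Option Int) :=
  if buf = [] then some none else (PySem.Int.ofChars? buf).map some

-- A's while loop over the deque: state = (buffer, data, divider_count); none = a ValueError was raised
def pvLoopA : List Char → List Char → List (Option Int) → Nat → Option (List (Option Int))
  | [], buf, data, _ =>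
      (pvConvA buf).map (fun v => data ++ [v])
  | c :: rest, buf, data, cnt =>
      if c ≠ '/' then
        pvLoopA rest (buf ++ [c]) data cnt
      else if cnt = 2 then
        none                                   -- raise ValueError('Too many indices')
      else
        match pvConvA buf with
        | none => none
        | some v => pvLoopA rest [] (data ++ [v]) (cnt + 1)

-- [] is the junk value on inputs where the Python raises; Pre_ excludes those
def lex_polygon_py (chars : String) : List (Option Int) :=
  (pvLoopA chars.toList [] [] 0).getD []

-- ===== PORT B =====
-- 'int(p) if p else None' for one segment; none = int() raised ValueError
def pvConvB (p : List Char) : Option (Option Int) :=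
  if p = [] then some none else (PySem.Int.ofChars? p).map some

-- 'tuple(int(p) if p else None for p in parts)'
def pvTupleB (parts : List (List Char)) : Option (List (Option Int)) :=
  parts.mapM pvConvB

def lex_polygon_py_alt (chars : String) : List (Option Int) :=
  let parts := PySem.Chars.splitOn chars.toList ['/']
  (if parts.length > 3 then none else pvTupleB parts).getD []

-- ===== PRECONDITION & SPEC =====
-- Pre_ = exactly the inputs where Python A returns: at most 3 '/'-separated segments and every
-- nonempty segment parses as a Python int (otherwise A raises ValueError('Invalid polygon format')).
def Pre_lex_polygon_py (chars : String) : Prop :=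
  (PySem.Chars.splitOn chars.toList ['/']).length ≤ 3 ∧
    ∀ p ∈ PySem.Chars.splitOn chars.toList ['/'], p ≠ [] → (PySem.Int.ofChars? p).isSome = true
instance (chars : String) : Decidable (Pre_lex_polygon_py chars) := by unfold Pre_lex_polygon_py; infer_instance
def pvWitness_lex_polygon_py : String := "12//-3"

def Spec_lex_polygon_py (chars : String) (out : List (Option Int)) : Prop := out = lex_polygon_py_alt chars
instance (chars : String) (out : List (Option Int)) : Decidable (Spec_lex_polygon_py chars out) := by unfold Spec_lex_polygon_py; infer_instance

-- ===== CLAIM (what is proved, stated in full; the proofs are below) =====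
def Claim_equal_lex_polygon_py : Prop := ∀ (chars : String), Dom_lex_polygon_py chars → Pre_lex_polygon_py chars → Spec_lex_polygon_py chars (lex_polygon_py chars)

-- ===== LEMMAS AND PROOFS =====

-- straightforward recursive form of splitting on '/' (pre = segment collected so far)
def pvSplit (pre : List Char) : List Char → List (List Char)
  | [] => [pre]
  | c :: rest => if c = '/' then pre :: pvSplit [] rest else pvSplit (pre ++ [c]) rest

theorem pvGo_spec : ∀ (fuel : Nat) (l cur : List Char) (acc : List (List Char)) (_ : l.length < fuel),
    PySem.Chars.splitOn.go ['/'] fuel l cur acc = acc.reverse ++ pvSplit cur.reverse l := by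
  intro fuel
  induction fuel with
  | zero => intro l cur acc h; omega
  | succ n ih =>
    intro l cur acc h
    cases l with
    | nil => simp [PySem.Chars.splitOn.go, pvSplit]
    | cons c rest =>
      simp only [PySem.Chars.splitOn.go]
      simp only [List.length_cons] at h
      by_cases hc : c = '/'
      · subst hc
        simp only [List.isPrefixOf, Bool.and_true]
        rw [if_pos (by simp)]
        simp only [List.length_cons, List.length_nil, List.drop_succ_cons, List.drop_zero]
        rw [ih _ _ _ (by omega)]
        simp [pvSplit]
      · have hp : List.isPrefixOf ['/'] (c :: rest) = false := by
          simp [List.isPrefixOf]; exact fun h' => hc h'.symm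
        rw [hp]
        simp only [Bool.false_eq_true, if_false]
        rw [ih _ _ _ (by omega)]
        simp [pvSplit, hc]

theorem pvSplitOn_eq (s : List Char) : PySem.Chars.splitOn s ['/'] = pvSplit [] s := by
  have := pvGo_spec (s.length + 1) s [] [] (by omega)
  simpa [PySem.Chars.splitOn] using this

theorem pvSplit_length_pos (pre l : List Char) : 0 < (pvSplit pre l).length := by
  induction l generalizing pre with
  | nil => simp [pvSplit]
  | cons c rest ih =>
    simp only [pvSplit]
    split_ifs
    · simp
    · exact ih _

-- A's loop, expressed through the split of the remaining input
theorem pvLoopA_spec : ∀ (l buf : List Char) (data : List (Option Int)) (cnt : Nat), cnt ≤ 2 →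
    pvLoopA l buf data cnt =
      (if cnt + (pvSplit buf l).length > 3 then none
       else ((pvSplit buf l).mapM pvConvB).map (data ++ ·)) := by
  intro l
  induction l with
  | nil =>
    intro buf data cnt hcnt
    rw [if_neg (by simp [pvSplit]; omega)]
    simp only [pvLoopA, pvSplit, List.mapM_cons, List.mapM_nil]
    cases h : pvConvA buf with
    | none => simp [pvConvA, pvConvB] at h ⊢; simp [h]
    | some v => simp [pvConvA, pvConvB] at h ⊢; simp [h]
  | cons c rest ih =>
    intro buf data cnt hcnt
    by_cases hc : c = '/'
    · subst hc
      simp only [pvLoopA, ne_eq, not_true_eq_false, if_false, pvSplit, if_true]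
      by_cases h2 : cnt = 2
      · subst h2
        rw [if_pos rfl, if_pos]
        simp only [List.length_cons]
        have := pvSplit_length_pos [] rest
        omega
      · rw [if_neg h2]
        cases hv : pvConvA buf with
        | none =>
          have hv' : pvConvB buf = none := hv
          split_ifs <;> simp [List.mapM_cons, hv']
        | some v =>
          have hv' : pvConvB buf = some v := hv
          show pvLoopA rest [] (data ++ [v]) (cnt + 1) = _
          rw [ih [] (data ++ [v]) (cnt + 1) (by omega)]
          simp only [List.length_cons, List.mapM_cons, hv']
          by_cases hbig : cnt + (pvSplit [] rest).length + 1 > 3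
          · rw [if_pos (by omega), if_pos (by omega)]
          · rw [if_neg (by omega), if_neg (by omega)]
            cases (pvSplit [] rest).mapM pvConvB <;> simp
    · simp only [pvLoopA, if_pos hc, pvSplit, if_neg hc]
      exact ih (buf ++ [c]) data cnt hcnt

-- ===== VERDICT (by name: the statement is the Claim_ definition above) =====
theorem lex_polygon_py_spec : Claim_equal_lex_polygon_py := by
  intro chars _ _
  unfold Spec_lex_polygon_py lex_polygon_py lex_polygon_py_alt pvTupleB
  rw [pvSplitOn_eq, pvLoopA_spec chars.toList [] [] 0 (by omega)]
  simp only [Nat.zero_add]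
  split_ifs
  · rfl
  · cases (pvSplit [] chars.toList).mapM pvConvB <;> simp
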